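-- pv_equiv track=rewrite | github.com/emilbratt/adventofcode | 2021/5/main.py | update_hydroplane
-- ===== SOURCE A (Python) =====
-- def return_highest_number(a: int, b:int):
--     return ( a * (a > b) + b * (a <= b) )
--
-- def get_arr_len(coordinates: list):
--     arr_len = 0
--     for _ in coordinates:
--         arr_len += 1
--     return arr_len
--
-- def get_axis_increment_value(a: int,b: int):
--     # returns either -1, 0 or +1
--     # if a is greatest = -1
--     # if b is greatest = +1
--     # if equal = 0
--     is_equal = 1 * ( a == b )
--     a_is_higher = 1 * ( a > b )
--     increment = 1 - is_equal - a_is_higher - a_is_higher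
--     return increment
--
-- def update_hydroplane(coordinates: list, hydroplane: list):
--     total_plot_count = get_arr_len(coordinates)
--     plot_count = 0
--     while total_plot_count > plot_count:
--         plots = coordinates[plot_count]
--         x_one = int(plots[0][0])
--         y_one = int(plots[0][1])
--         x_two = int(plots[1][0])
--         y_two = int(plots[1][1])
--
--         # this gives us the increment value (0, -1 or +1) for each axis
--         # which in turn makes it possible to run both diagonal and
--         # non diagonal plots in this very same while loop
--         x_steps = get_axis_increment_value(x_one,x_two)
--         y_steps = get_axis_increment_value(y_one,y_two)
--
--         # # this gives us the "range" that the line will span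
--         x_positive_steps = ( (x_one > x_two) * (x_one - x_two) )
--         x_negative_steps = ( (x_two > x_one) * (x_two - x_one) )
--         x_range = x_positive_steps + x_negative_steps
--         y_positive_steps = ( (y_one > y_two) * (y_one - y_two) )
--         y_negative_steps = ( (y_two > y_one) * (y_two - y_one) )
--         y_range = y_positive_steps + y_negative_steps
--
--         # we might have a none diagnoal, which means we need the none zero value
--         axis_range = return_highest_number(x_range, y_range)
--
--         step = 0 # iterate until we reach the range + 1 (for last plot)
--         while step < ( axis_range + 1 ):
--             hydroplane[y_one][x_one] += 1
--             x_one += x_steps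
--             y_one += y_steps
--             # increments with either 0, +1 or -1 based on steps contidion
--
--             step += 1
--
--         plot_count += 1
--
--     return hydroplane
-- ===== SOURCE B (Python) =====
-- def update_hydroplane(coordinates: list, hydroplane: list):
--     # Staged passes: collect every covered point, tally them in a dict,
--     # then apply each cell's total count to the grid with ONE += per distinct cell.
--     # (Mutates hydroplane in place like the original; equivalence is about the return value.)
--     points = []
--     for plots in coordinates:
--         x1 = int(plots[0][0])
--         y1 = int(plots[0][1])
--         x2 = int(plots[1][0])
--         y2 = int(plots[1][1])
--         dx = x2 - x1
--         dy = y2 - y1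
--         sx = (dx > 0) - (dx < 0)
--         sy = (dy > 0) - (dy < 0)
--         for k in range(max(abs(dx), abs(dy)) + 1):
--             points.append((x1 + k * sx, y1 + k * sy))
--     counts = {}
--     for p in points:
--         counts[p] = counts.get(p, 0) + 1
--     for (x, y), c in counts.items():
--         hydroplane[y][x] += c
--     return hydroplane
-- ===== Notes on version B (the rewrite author's own statement) =====
-- stated objective: alternative
-- what changed: Replaces A's single-pass in-place walk (branch-free 0/1 arithmetic for signs/ranges inside one while loop that bumps each grid cell as it steps) with three staged passes: materialise the list of all covered points, aggregate them into a dict counter, then apply each distinct cell's total with one += per cell; correct because grid increments commute, so applying per-cell totals equals applying the increments in visit order.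
import Mathlib
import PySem

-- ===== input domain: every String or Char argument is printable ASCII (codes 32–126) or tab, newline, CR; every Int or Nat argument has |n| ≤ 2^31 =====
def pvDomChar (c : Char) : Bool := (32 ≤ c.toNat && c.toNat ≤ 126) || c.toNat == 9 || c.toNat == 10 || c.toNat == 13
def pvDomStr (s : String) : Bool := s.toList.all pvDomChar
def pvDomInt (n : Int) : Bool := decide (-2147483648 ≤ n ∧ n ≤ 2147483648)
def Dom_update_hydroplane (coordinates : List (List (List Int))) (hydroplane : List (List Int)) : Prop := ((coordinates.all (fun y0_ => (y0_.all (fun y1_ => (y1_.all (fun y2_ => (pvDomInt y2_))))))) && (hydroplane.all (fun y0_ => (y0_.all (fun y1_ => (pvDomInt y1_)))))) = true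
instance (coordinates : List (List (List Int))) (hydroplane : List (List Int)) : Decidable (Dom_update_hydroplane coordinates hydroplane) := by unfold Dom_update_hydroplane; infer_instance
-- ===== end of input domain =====

-- B replaces A's single in-place stepping loop by three staged passes (collect all covered points,
-- tally them in a dict counter, apply each cell's total once); both Pythons mutate `hydroplane`
-- in place, the equivalence proved here is about the returned grid.

-- ===== PORT A =====
-- `hydroplane[y][x] += 1` with Python index semantics (negative wrap); where Python would raise
-- (index out of range, excluded by Pre_) the grid is returned unchanged.
def pvIncr (h : List (List Int)) (y x : Int) : List (List Int) :=
  let row := PySem.List.pyGetD h y []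
  PySem.List.pySetD h y (PySem.List.pySetD row x (PySem.List.pyGetD row x 0 + 1))

def return_highest_number (a b : Int) : Int :=
  a * (if a > b then 1 else 0) + b * (if a ≤ b then 1 else 0)

def get_arr_len (coordinates : List (List (List Int))) : Int :=
  coordinates.foldl (fun n _ => n + 1) 0

def get_axis_increment_value (a b : Int) : Int :=
  let is_equal : Int := if a = b then 1 else 0
  let a_is_higher : Int := if a > b then 1 else 0
  1 - is_equal - a_is_higher - a_is_higher

-- the inner `while step < axis_range + 1` loop, fuel = number of remaining steps
def pvInnerA : Nat → Int → Int → Int → Int → List (List Int) → List (List Int)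
  | 0, _, _, _, _, h => h
  | f+1, x_one, y_one, x_steps, y_steps, h =>
      pvInnerA f (x_one + x_steps) (y_one + y_steps) x_steps y_steps (pvIncr h y_one x_one)

-- the body of the outer while loop for one `plots`
def pvSegA (x_one y_one x_two y_two : Int) (h : List (List Int)) : List (List Int) :=
  let x_steps := get_axis_increment_value x_one x_two
  let y_steps := get_axis_increment_value y_one y_two
  let x_positive_steps := (if x_one > x_two then (1:Int) else 0) * (x_one - x_two)
  let x_negative_steps := (if x_two > x_one then (1:Int) else 0) * (x_two - x_one)
  let x_range := x_positive_steps + x_negative_steps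
  let y_positive_steps := (if y_one > y_two then (1:Int) else 0) * (y_one - y_two)
  let y_negative_steps := (if y_two > y_one then (1:Int) else 0) * (y_two - y_one)
  let y_range := y_positive_steps + y_negative_steps
  let axis_range := return_highest_number x_range y_range
  pvInnerA (axis_range + 1).toNat x_one y_one x_steps y_steps h

def pvStepA (h : List (List Int)) (plots : List (List Int)) : List (List Int) :=
  pvSegA (PySem.List.pyGetD (PySem.List.pyGetD plots 0 []) 0 0)
         (PySem.List.pyGetD (PySem.List.pyGetD plots 0 []) 1 0)
         (PySem.List.pyGetD (PySem.List.pyGetD plots 1 []) 0 0)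
         (PySem.List.pyGetD (PySem.List.pyGetD plots 1 []) 1 0) h

-- the outer `while total_plot_count > plot_count` loop, fuel = remaining plots
def pvOuterA (coordinates : List (List (List Int))) : Nat → Int → List (List Int) → List (List Int)
  | 0, _, h => h
  | f+1, plot_count, h =>
      match PySem.List.pyGet? coordinates plot_count with
      | none => h
      | some plots => pvOuterA coordinates f (plot_count + 1) (pvStepA h plots)

def update_hydroplane (coordinates : List (List (List Int))) (hydroplane : List (List Int)) : List (List Int) :=
  pvOuterA coordinates (get_arr_len coordinates).toNat 0 hydroplane

-- ===== PORT B =====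
-- `hydroplane[y][x] += c` (same totalized Python indexing as pvIncr)
def pvIncrBy (h : List (List Int)) (y x c : Int) : List (List Int) :=
  let row := PySem.List.pyGetD h y []
  PySem.List.pySetD h y (PySem.List.pySetD row x (PySem.List.pyGetD row x 0 + c))

-- pass 1 body: append the points of one segment to the accumulated list
def pvSegPts (plots : List (List Int)) (acc : List (Int × Int)) : List (Int × Int) :=
  let x1 := PySem.List.pyGetD (PySem.List.pyGetD plots 0 []) 0 0
  let y1 := PySem.List.pyGetD (PySem.List.pyGetD plots 0 []) 1 0
  let x2 := PySem.List.pyGetD (PySem.List.pyGetD plots 1 []) 0 0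
  let y2 := PySem.List.pyGetD (PySem.List.pyGetD plots 1 []) 1 0
  let dx := x2 - x1
  let dy := y2 - y1
  let sx := (if dx > 0 then (1:Int) else 0) - (if dx < 0 then 1 else 0)
  let sy := (if dy > 0 then (1:Int) else 0) - (if dy < 0 then 1 else 0)
  (PySem.List.pyRange 0 (max |dx| |dy| + 1) 1).foldl
    (fun a k => a ++ [(x1 + k * sx, y1 + k * sy)]) acc

def update_hydroplane_alt (coordinates : List (List (List Int))) (hydroplane : List (List Int)) : List (List Int) :=
  let points := coordinates.foldl (fun acc plots => pvSegPts plots acc) []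
  let counts := points.foldl (fun d p => d.insert p (d.getD p 0 + 1)) PySem.Dict.empty
  counts.items.foldl (fun g pc => pvIncrBy g pc.1.2 pc.1.1 pc.2) hydroplane

-- ===== PRECONDITION & SPEC =====
-- Pre_ = exactly the inputs on which the Python A returns (no IndexError): each plots entry has the
-- 2×2 shape the code indexes, and every grid cell visited along the segment is a valid (possibly
-- negative, Python-wrapping) index into hydroplane.
def pvInB (len : Nat) (i : Int) : Bool := decide (-(len:Int) ≤ i ∧ i < (len:Int))

-- all of the ≤ max|Δx|,|Δy| + 1 visited cells (start plus sign steps) are valid Python indices;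
-- checked with early exit so that it decides quickly even for huge coordinates
def pvCellsOk (h : List (List Int)) : Nat → Int → Int → Int → Int → Bool
  | 0, _, _, _, _ => true
  | n+1, x, y, sx, sy =>
    if pvInB h.length y && pvInB (PySem.List.pyGetD h y []).length x then
      pvCellsOk h n (x + sx) (y + sy) sx sy
    else false

def pvSegOk (h : List (List Int)) (plots : List (List Int)) : Bool :=
  decide (2 ≤ plots.length) &&
  decide (2 ≤ (plots.getD 0 []).length) &&
  decide (2 ≤ (plots.getD 1 []).length) &&
  (let x1 := (plots.getD 0 []).getD 0 0
   let y1 := (plots.getD 0 []).getD 1 0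
   let x2 := (plots.getD 1 []).getD 0 0
   let y2 := (plots.getD 1 []).getD 1 0
   pvCellsOk h (max (x2 - x1).natAbs (y2 - y1).natAbs + 1) x1 y1 (x2 - x1).sign (y2 - y1).sign)

def Pre_update_hydroplane (coordinates : List (List (List Int))) (hydroplane : List (List Int)) : Prop :=
  coordinates.all (pvSegOk hydroplane) = true
instance (coordinates : List (List (List Int))) (hydroplane : List (List Int)) : Decidable (Pre_update_hydroplane coordinates hydroplane) := by unfold Pre_update_hydroplane; infer_instance

def pvWitness_update_hydroplane : List (List (List Int)) × List (List Int) :=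
  ([[[0, 0], [1, 1]], [[0, 1], [1, 1]]], [[0, 0], [0, 0]])

def Spec_update_hydroplane (coordinates : List (List (List Int))) (hydroplane : List (List Int)) (out : List (List Int)) : Prop := out = update_hydroplane_alt coordinates hydroplane
instance (coordinates : List (List (List Int))) (hydroplane : List (List Int)) (out : List (List Int)) : Decidable (Spec_update_hydroplane coordinates hydroplane out) := by unfold Spec_update_hydroplane; infer_instance

-- ===== CLAIM (what is proved, stated in full; the proofs are below) =====
def Claim_equal_update_hydroplane : Prop := ∀ (coordinates : List (List (List Int))) (hydroplane : List (List Int)), Dom_update_hydroplane coordinates hydroplane → Pre_update_hydroplane coordinates hydroplane → Spec_update_hydroplane coordinates hydroplane (update_hydroplane coordinates hydroplane)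

-- ===== LEMMAS AND PROOFS =====

-- one Python increment, as a fold step over points (x, y)
def pvApply (g : List (List Int)) (p : Int × Int) : List (List Int) := pvIncr g p.2 p.1

-- normal forms of pvIncr/pvIncrBy through the resolved physical indices
def rowIncBy (row : List Int) (x c : Int) : List Int :=
  match PySem.List.pyIdx? row.length x with
  | none => row
  | some j => row.set j (row.getD j 0 + c)

def gridIncBy (h : List (List Int)) (y x c : Int) : List (List Int) :=
  match PySem.List.pyIdx? h.length y with
  | none => h
  | some r => h.set r (rowIncBy (h.getD r []) x c)

lemma pyIdx?_lt {n : Nat} {i : Int} {k : Nat} (h : PySem.List.pyIdx? n i = some k) : k < n := by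
  unfold PySem.List.pyIdx? at h
  split_ifs at h <;> simp_all <;> omega

lemma rowIncBy_none {row : List Int} {x : Int} (c : Int)
    (hx : PySem.List.pyIdx? row.length x = none) : rowIncBy row x c = row := by
  unfold rowIncBy; rw [hx]

lemma rowIncBy_some {row : List Int} {x : Int} {j : Nat} (c : Int)
    (hx : PySem.List.pyIdx? row.length x = some j) :
    rowIncBy row x c = row.set j (row.getD j 0 + c) := by
  unfold rowIncBy; rw [hx]

lemma gridIncBy_none {h : List (List Int)} {y : Int} (x c : Int)
    (hy : PySem.List.pyIdx? h.length y = none) : gridIncBy h y x c = h := by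
  unfold gridIncBy; rw [hy]

lemma gridIncBy_some {h : List (List Int)} {y : Int} {r : Nat} (x c : Int)
    (hy : PySem.List.pyIdx? h.length y = some r) :
    gridIncBy h y x c = h.set r (rowIncBy (h.getD r []) x c) := by
  unfold gridIncBy; rw [hy]

lemma pvIncrBy_eq_gridIncBy (h : List (List Int)) (y x c : Int) :
    pvIncrBy h y x c = gridIncBy h y x c := by
  unfold pvIncrBy PySem.List.pySetD PySem.List.pySet? PySem.List.pyGetD PySem.List.pyGet?
  cases hy : PySem.List.pyIdx? h.length y with
  | none => simp only [Option.bind_none, Option.map_none, Option.getD_none, gridIncBy_none x c hy]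
  | some r =>
    have hr := pyIdx?_lt hy
    rw [gridIncBy_some x c hy]
    simp only [Option.bind_some, Option.map_some]
    rw [List.getElem?_eq_getElem hr]
    simp only [Option.getD_some]
    have hrow : h.getD r [] = h[r] := List.getD_eq_getElem h [] hr
    rw [hrow]
    cases hx : PySem.List.pyIdx? h[r].length x with
    | none =>
      rw [rowIncBy_none c hx]
      simp only [Option.bind_none, Option.map_none, Option.getD_none]
    | some j =>
      have hj := pyIdx?_lt hx
      rw [rowIncBy_some c hx]
      simp only [Option.bind_some, Option.map_some, Option.getD_some]
      rw [List.getElem?_eq_getElem hj, Option.getD_some, List.getD_eq_getElem h[r] 0 hj]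

lemma pvIncr_eq_incrBy (h : List (List Int)) (y x : Int) : pvIncr h y x = pvIncrBy h y x 1 := rfl

lemma rowIncBy_length (row : List Int) (x c : Int) : (rowIncBy row x c).length = row.length := by
  unfold rowIncBy; cases PySem.List.pyIdx? row.length x <;> simp

lemma gridIncBy_length (h : List (List Int)) (y x c : Int) : (gridIncBy h y x c).length = h.length := by
  unfold gridIncBy; cases PySem.List.pyIdx? h.length y <;> simp

-- getD over set, within bounds
lemma pvGetD_set_self {α : Type} (l : List α) (j : Nat) (hj : j < l.length) (v d : α) :
    (l.set j v).getD j d = v := by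
  rw [List.getD_eq_getElem _ d (by simpa using hj)]
  exact List.getElem_set_self (by simpa using hj)

lemma pvGetD_set_ne {α : Type} (l : List α) {i j : Nat} (hne : i ≠ j) (hj : j < l.length) (v d : α) :
    (l.set i v).getD j d = l.getD j d := by
  rw [List.getD_eq_getElem _ d (by simpa using hj), List.getD_eq_getElem l d hj]
  exact List.getElem_set_ne hne _

lemma rowIncBy_zero (row : List Int) (x : Int) : rowIncBy row x 0 = row := by
  cases hx : PySem.List.pyIdx? row.length x with
  | none => exact rowIncBy_none 0 hx
  | some j =>
    have hj := pyIdx?_lt hx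
    rw [rowIncBy_some 0 hx, add_zero, List.getD_eq_getElem row 0 hj]
    exact List.set_getElem_self hj

lemma gridIncBy_zero (h : List (List Int)) (y x : Int) : gridIncBy h y x 0 = h := by
  cases hy : PySem.List.pyIdx? h.length y with
  | none => exact gridIncBy_none x 0 hy
  | some r =>
    have hr := pyIdx?_lt hy
    rw [gridIncBy_some x 0 hy, rowIncBy_zero, List.getD_eq_getElem h [] hr]
    exact List.set_getElem_self hr

lemma rowIncBy_add (row : List Int) (x a b : Int) :
    rowIncBy (rowIncBy row x a) x b = rowIncBy row x (a + b) := by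
  cases hx : PySem.List.pyIdx? row.length x with
  | none => rw [rowIncBy_none a hx, rowIncBy_none b hx, rowIncBy_none (a + b) hx]
  | some j =>
    have hj := pyIdx?_lt hx
    have hx' : PySem.List.pyIdx? (row.set j (row.getD j 0 + a)).length x = some j := by
      simpa using hx
    rw [rowIncBy_some a hx, rowIncBy_some b hx', rowIncBy_some (a + b) hx,
      pvGetD_set_self row j hj, List.set_set]
    congr 1
    ring

lemma gridIncBy_add (h : List (List Int)) (y x a b : Int) :
    gridIncBy (gridIncBy h y x a) y x b = gridIncBy h y x (a + b) := by
  cases hy : PySem.List.pyIdx? h.length y with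
  | none => rw [gridIncBy_none x a hy, gridIncBy_none x b hy, gridIncBy_none x (a + b) hy]
  | some r =>
    have hr := pyIdx?_lt hy
    have hy' : PySem.List.pyIdx? (h.set r (rowIncBy (h.getD r []) x a)).length y = some r := by
      simpa using hy
    rw [gridIncBy_some x a hy, gridIncBy_some x b hy', gridIncBy_some x (a + b) hy,
      pvGetD_set_self h r hr, List.set_set, rowIncBy_add]

lemma rowIncBy_comm (row : List Int) (x x' a b : Int) :
    rowIncBy (rowIncBy row x a) x' b = rowIncBy (rowIncBy row x' b) x a := by
  cases hx : PySem.List.pyIdx? row.length x with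
  | none =>
    rw [rowIncBy_none a hx, rowIncBy_none a (by rw [rowIncBy_length]; exact hx)]
  | some j =>
    cases hx' : PySem.List.pyIdx? row.length x' with
    | none =>
      rw [rowIncBy_none b hx', rowIncBy_none b (by rw [rowIncBy_length]; exact hx')]
    | some j' =>
      have hj := pyIdx?_lt hx
      have hj' := pyIdx?_lt hx'
      rw [rowIncBy_some a hx, rowIncBy_some b hx',
        rowIncBy_some b (by rw [List.length_set]; exact hx'),
        rowIncBy_some a (by rw [List.length_set]; exact hx)]
      by_cases hjj : j = j'
      · subst hjj
        rw [pvGetD_set_self row j hj, pvGetD_set_self row j hj, List.set_set, List.set_set]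
        congr 1
        ring
      · rw [pvGetD_set_ne row hjj hj' _ 0, pvGetD_set_ne row (Ne.symm hjj) hj _ 0,
          List.set_comm _ _ hjj]

lemma gridIncBy_comm (h : List (List Int)) (y x y' x' a b : Int) :
    gridIncBy (gridIncBy h y x a) y' x' b = gridIncBy (gridIncBy h y' x' b) y x a := by
  cases hy : PySem.List.pyIdx? h.length y with
  | none =>
    rw [gridIncBy_none x a hy, gridIncBy_none x a (by rw [gridIncBy_length]; exact hy)]
  | some r =>
    cases hy' : PySem.List.pyIdx? h.length y' with
    | none =>
      rw [gridIncBy_none x' b hy', gridIncBy_none x' b (by rw [gridIncBy_length]; exact hy')]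
    | some r' =>
      have hr := pyIdx?_lt hy
      have hr' := pyIdx?_lt hy'
      rw [gridIncBy_some x a hy, gridIncBy_some x' b hy',
        gridIncBy_some x' b (by rw [List.length_set]; exact hy'),
        gridIncBy_some x a (by rw [List.length_set]; exact hy)]
      by_cases hrr : r = r'
      · subst hrr
        rw [pvGetD_set_self h r hr, pvGetD_set_self h r hr, List.set_set, List.set_set,
          rowIncBy_comm]
      · rw [pvGetD_set_ne h hrr hr' _ [], pvGetD_set_ne h (Ne.symm hrr) hr _ [],
          List.set_comm _ _ hrr]

lemma pvApply_rightComm : RightCommutative pvApply := by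
  refine ⟨fun g p q => ?_⟩
  simp only [pvApply, pvIncr_eq_incrBy, pvIncrBy_eq_gridIncBy]
  exact gridIncBy_comm g p.2 p.1 q.2 q.1 1 1

-- ---- the common point list of one segment ----
def pvSgn (d : Int) : Int := (if d > 0 then (1:Int) else 0) - (if d < 0 then 1 else 0)

def ptsOf (x1 y1 sx sy : Int) (n : Nat) : List (Int × Int) :=
  (List.range n).map (fun k : Nat => (x1 + (k : Int) * sx, y1 + (k : Int) * sy))

def ptsSeg (plots : List (List Int)) : List (Int × Int) :=
  ptsOf (PySem.List.pyGetD (PySem.List.pyGetD plots 0 []) 0 0)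
        (PySem.List.pyGetD (PySem.List.pyGetD plots 0 []) 1 0)
        (pvSgn (PySem.List.pyGetD (PySem.List.pyGetD plots 1 []) 0 0
                - PySem.List.pyGetD (PySem.List.pyGetD plots 0 []) 0 0))
        (pvSgn (PySem.List.pyGetD (PySem.List.pyGetD plots 1 []) 1 0
                - PySem.List.pyGetD (PySem.List.pyGetD plots 0 []) 1 0))
        (max (PySem.List.pyGetD (PySem.List.pyGetD plots 1 []) 0 0
              - PySem.List.pyGetD (PySem.List.pyGetD plots 0 []) 0 0).natAbs
             (PySem.List.pyGetD (PySem.List.pyGetD plots 1 []) 1 0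
              - PySem.List.pyGetD (PySem.List.pyGetD plots 0 []) 1 0).natAbs + 1)

-- ---- A reduces to a fold of pvApply over the concatenated point lists ----
lemma pvInnerA_eq_foldl_range : forall (n : Nat) (x y sx sy : Int) (h : List (List Int)),
    pvInnerA n x y sx sy h
      = (List.range n).foldl (fun g (k : Nat) => pvIncr g (y + (k : Int) * sy) (x + (k : Int) * sx)) h := by
  intro n
  induction n with
  | zero => intro x y sx sy h; rfl
  | succ n ih =>
    intro x y sx sy h
    rw [List.range_succ_eq_map]
    simp only [List.foldl_cons, List.foldl_map]
    show pvInnerA n (x + sx) (y + sy) sx sy (pvIncr h y x) = _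
    rw [ih]
    congr 1
    · funext g k
      congr 1 <;> push_cast <;> ring
    · congr 1 <;> simp

lemma get_arr_len_eq (l : List (List (List Int))) : get_arr_len l = (l.length : Int) := by
  have aux : forall (l : List (List (List Int))) (init : Int),
      l.foldl (fun n _ => n + 1) init = init + l.length := by
    intro l
    induction l with
    | nil => intro init; simp
    | cons a l ih => intro init; rw [List.foldl_cons, ih, List.length_cons]; push_cast; ring
  simpa using aux l 0

lemma pvOuterA_eq_foldl : forall (rest pre : List (List (List Int))) (h : List (List Int)),
    pvOuterA (pre ++ rest) rest.length (pre.length : Int) h = rest.foldl pvStepA h := by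
  intro rest
  induction rest with
  | nil => intro pre h; rfl
  | cons p rest ih =>
    intro pre h
    show (match PySem.List.pyGet? (pre ++ p :: rest) (pre.length : Int) with
          | none => h
          | some plots => pvOuterA (pre ++ p :: rest) rest.length ((pre.length : Int) + 1) (pvStepA h plots)) = _
    rw [PySem.List.pyGet?_append_length]
    show pvOuterA (pre ++ p :: rest) rest.length ((pre.length : Int) + 1) (pvStepA h p)
        = List.foldl pvStepA (pvStepA h p) rest
    have ih' := ih (pre ++ [p]) (pvStepA h p)
    rw [List.append_assoc] at ih'
    simpa using ih'

lemma rhn_eq_max (a b : Int) : return_highest_number a b = max a b := by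
  simp only [return_highest_number]
  split_ifs <;> omega

lemma axis_eq_sgn (a b : Int) : get_axis_increment_value a b = pvSgn (b - a) := by
  simp only [get_axis_increment_value, pvSgn]
  split_ifs <;> omega

lemma range_expr_eq_natAbs (a b : Int) :
    (if a > b then (1:Int) else 0) * (a - b) + (if b > a then (1:Int) else 0) * (b - a)
      = ((b - a).natAbs : Int) := by
  split_ifs <;> omega

lemma pvSegA_eq (x1 y1 x2 y2 : Int) (h : List (List Int)) :
    pvSegA x1 y1 x2 y2 h
      = (ptsOf x1 y1 (pvSgn (x2 - x1)) (pvSgn (y2 - y1))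
          (max (x2 - x1).natAbs (y2 - y1).natAbs + 1)).foldl pvApply h := by
  simp only [pvSegA, range_expr_eq_natAbs, rhn_eq_max, axis_eq_sgn]
  rw [pvInnerA_eq_foldl_range]
  have hn : ((max (((x2 - x1).natAbs : Int)) (((y2 - y1).natAbs : Int))) + 1).toNat
      = max (x2 - x1).natAbs (y2 - y1).natAbs + 1 := by omega
  rw [hn]
  simp only [ptsOf]
  rw [List.foldl_map (f := fun k : Nat =>
    ((x1 + (k:Int) * pvSgn (x2 - x1), y1 + (k:Int) * pvSgn (y2 - y1)) : Int × Int))]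
  rfl

lemma pvStepA_eq (h : List (List Int)) (plots : List (List Int)) :
    pvStepA h plots = (ptsSeg plots).foldl pvApply h := by
  simp only [pvStepA, ptsSeg]
  exact pvSegA_eq _ _ _ _ h

lemma updateA_eq_flatMap (coordinates : List (List (List Int))) (hydroplane : List (List Int)) :
    update_hydroplane coordinates hydroplane
      = (coordinates.flatMap ptsSeg).foldl pvApply hydroplane := by
  unfold update_hydroplane
  rw [get_arr_len_eq, Int.toNat_natCast]
  have h0 := pvOuterA_eq_foldl coordinates [] hydroplane
  simp only [List.nil_append, List.length_nil, Nat.cast_zero] at h0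
  rw [h0, List.foldl_flatMap]
  apply PySem.List.foldl_congr_mem
  intro acc x _
  exact pvStepA_eq acc x

-- ---- B's pass 1 materialises exactly those points ----
lemma foldl_pyRange_pts (x1 y1 s t m : Int) (hm : 0 ≤ m) (acc : List (Int × Int)) :
    (PySem.List.pyRange 0 (m + 1) 1).foldl (fun a k => a ++ [(x1 + k * s, y1 + k * t)]) acc
      = acc ++ ptsOf x1 y1 s t (m.toNat + 1) := by
  rw [PySem.List.pyRange_one, PySem.List.foldl_append_singleton_eq_map, List.map_map]
  congr 1
  have hn : (m + 1 - 0).toNat = m.toNat + 1 := by omega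
  rw [hn]
  simp only [ptsOf]
  exact List.map_congr_left (fun k _ => by simp [Function.comp])

lemma pvSegPts_eq (plots : List (List Int)) (acc : List (Int × Int)) :
    pvSegPts plots acc = acc ++ ptsSeg plots := by
  simp only [pvSegPts, ptsSeg, pvSgn]
  have habs : forall d : Int, |d| = ((d.natAbs : Int)) := fun d => Int.abs_eq_natAbs d
  rw [habs, habs]
  have hmax : max ((((PySem.List.pyGetD (PySem.List.pyGetD plots 1 []) 0 0
        - PySem.List.pyGetD (PySem.List.pyGetD plots 0 []) 0 0).natAbs : Nat)) : Int)
      (((PySem.List.pyGetD (PySem.List.pyGetD plots 1 []) 1 0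
        - PySem.List.pyGetD (PySem.List.pyGetD plots 0 []) 1 0).natAbs : Nat) : Int)
      = ((max (PySem.List.pyGetD (PySem.List.pyGetD plots 1 []) 0 0
          - PySem.List.pyGetD (PySem.List.pyGetD plots 0 []) 0 0).natAbs
          (PySem.List.pyGetD (PySem.List.pyGetD plots 1 []) 1 0
          - PySem.List.pyGetD (PySem.List.pyGetD plots 0 []) 1 0).natAbs : Nat) : Int) := by
    omega
  rw [hmax, foldl_pyRange_pts _ _ _ _ _ (by positivity) acc, Int.toNat_natCast]

lemma pointsB_eq_flatMap (coordinates : List (List (List Int))) :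
    coordinates.foldl (fun acc plots => pvSegPts plots acc) []
      = coordinates.flatMap ptsSeg := by
  have hfun : (fun (acc : List (Int × Int)) plots => pvSegPts plots acc)
       = (fun acc plots => acc ++ ptsSeg plots) := by
    funext acc plots; exact pvSegPts_eq plots acc
  rw [hfun, PySem.List.foldl_append_eq_flatMap]
  simp

-- ---- B's pass 3 applied to counter items = fold of pvApply over a grouped permutation ----
lemma foldl_replicate_eq_incrBy : forall (c : Nat) (k : Int × Int) (h : List (List Int)),
    (List.replicate c k).foldl pvApply h = pvIncrBy h k.2 k.1 (c : Int) := by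
  intro c
  induction c with
  | zero =>
    intro k h
    rw [List.replicate_zero, List.foldl_nil, pvIncrBy_eq_gridIncBy]
    exact (gridIncBy_zero h k.2 k.1).symm
  | succ c ih =>
    intro k h
    rw [List.replicate_succ, List.foldl_cons, ih]
    simp only [pvApply, pvIncr_eq_incrBy, pvIncrBy_eq_gridIncBy, gridIncBy_add]
    congr 1
    push_cast
    ring

lemma apply_items_eq_foldl_grouped :
    forall (keys : List (Int × Int)) (cnt : (Int × Int) → Nat) (h : List (List Int)),
    (keys.map (fun k => (k, (cnt k : Int)))).foldl (fun g pc => pvIncrBy g pc.1.2 pc.1.1 pc.2) h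
      = (keys.flatMap (fun k => List.replicate (cnt k) k)).foldl pvApply h := by
  intro keys
  induction keys with
  | nil => intro cnt h; rfl
  | cons k ks ih =>
    intro cnt h
    rw [List.map_cons, List.foldl_cons, List.flatMap_cons, List.foldl_append,
      foldl_replicate_eq_incrBy]
    exact ih cnt _

lemma count_flatMap_replicate :
    forall (keys : List (Int × Int)) (_ : keys.Nodup) (cnt : (Int × Int) → Nat) (a : Int × Int),
    (keys.flatMap (fun k => List.replicate (cnt k) k)).count a
      = if a ∈ keys then cnt a else 0 := by
  intro keys
  induction keys with
  | nil => intro _ cnt a; simp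
  | cons k ks ih =>
    intro hnd cnt a
    rw [List.flatMap_cons, List.count_append, List.count_replicate,
      ih hnd.of_cons cnt a]
    by_cases hak : a = k
    · subst hak
      have hni : a ∉ ks := (List.nodup_cons.mp hnd).1
      simp [hni]
    · simp [hak, Ne.symm hak]

lemma grouped_perm (l : List (Int × Int)) :
    ((PySem.Set.ofList l : List (Int × Int)).flatMap
        (fun k => List.replicate (l.count k) k)).Perm l := by
  rw [List.perm_iff_count]
  intro a
  rw [count_flatMap_replicate _ (PySem.Set.nodup_ofList l) _ a]
  by_cases ha : a ∈ l
  · simp [PySem.Set.mem_ofList, ha]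
  · simp [PySem.Set.mem_ofList, ha, List.count_eq_zero.mpr ha]

lemma updateB_eq_flatMap (coordinates : List (List (List Int))) (hydroplane : List (List Int)) :
    update_hydroplane_alt coordinates hydroplane
      = (coordinates.flatMap ptsSeg).foldl pvApply hydroplane := by
  simp only [update_hydroplane_alt]
  rw [pointsB_eq_flatMap, PySem.Dict.foldl_insert_getD_add_one_eq_counter,
    PySem.Dict.items_counter, apply_items_eq_foldl_grouped]
  exact @List.Perm.foldl_eq _ _ pvApply _ _ pvApply_rightComm
    (grouped_perm (coordinates.flatMap ptsSeg)) hydroplane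

-- ===== VERDICT (by name: the statement is the Claim_ definition above) =====
theorem update_hydroplane_spec : Claim_equal_update_hydroplane := by
  intro coordinates hydroplane _ _
  unfold Spec_update_hydroplane
  rw [updateA_eq_flatMap, updateB_eq_flatMap]
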